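-- pv_equiv track=rewrite | github.com/Lizz-dankova/LAB | lab1.py | LongCompare
-- ===== SOURCE A (Python) =====
-- def LongCompare(a, b):
--     while len(a) > 1 and a[-1] == 0:
--         a.pop()
--     while len(b) > 1 and b[-1] == 0:
--         b.pop()
--     if len(a) == len(b):
--         for i in range(len(a) - 1, -1, -1):
--             if a[i] != b[i]:
--                 return 1 if a[i] > b[i] else -1
--         return 0
--     return 1 if len(a) > len(b) else -1
-- ===== SOURCE B (Python) =====
-- def LongCompare(a, b):
--     # Single least-significant-first pass over zero-padded digits: track each
--     # number's effective length (1 + index of last nonzero digit; 0 for an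
--     # empty array) and the sign of the last (= most significant) differing
--     # padded digit.  Unlike A, does not mutate its arguments.
--     la = 1 if a else 0
--     lb = 1 if b else 0
--     res = 0
--     for i in range(max(len(a), len(b))):
--         da = a[i] if i < len(a) else 0
--         db = b[i] if i < len(b) else 0
--         if da != 0:
--             la = i + 1
--         if db != 0:
--             lb = i + 1
--         if da != db:
--             res = 1 if da > db else -1
--     if la != lb:
--         return 1 if la > lb else -1
--     return res
-- ===== Notes on version B (the rewrite author's own statement) =====
-- stated objective: alternative
-- what changed: Instead of A's staged passes (strip trailing zeros in place, branch on lengths, then scan most-significant-first with early exit), B makes one least-significant-first pass over the zero-padded digits, accumulating each number's effective length and the sign of the last differing digit; B does not mutate its arguments (return values are equal everywhere).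
import Mathlib
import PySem

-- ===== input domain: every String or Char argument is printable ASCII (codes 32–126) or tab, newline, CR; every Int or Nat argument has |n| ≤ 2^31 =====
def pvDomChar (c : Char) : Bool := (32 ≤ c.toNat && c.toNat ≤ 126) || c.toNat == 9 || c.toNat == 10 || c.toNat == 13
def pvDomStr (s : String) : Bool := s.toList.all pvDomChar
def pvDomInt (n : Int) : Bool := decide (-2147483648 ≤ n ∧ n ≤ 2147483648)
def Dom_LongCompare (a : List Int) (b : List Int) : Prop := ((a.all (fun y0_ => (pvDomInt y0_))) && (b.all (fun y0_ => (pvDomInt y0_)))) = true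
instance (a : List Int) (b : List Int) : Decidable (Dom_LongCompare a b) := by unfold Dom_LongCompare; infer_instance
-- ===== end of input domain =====

-- B replaces A's staged passes (in-place trailing-zero stripping, length branch,
-- most-significant-first scan with early exit) by ONE least-significant-first pass over
-- zero-padded digits accumulating effective lengths and the last differing digit's sign
-- ('alternative' objective). A strips trailing zeros from its arguments IN PLACE and B does
-- not mutate at all; the equivalence proved here is about the RETURN value only.

-- ===== PORT A =====
-- the `while len(x) > 1 and x[-1] == 0: x.pop()` loop
def stripZeros (x : List Int) : List Int :=
  if _h : 1 < x.length ∧ x.getLast? = some 0 then stripZeros x.dropLast else x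
termination_by x.length
decreasing_by simp [List.length_dropLast]; omega

-- A's `for i in range(len(a)-1, -1, -1)` scan; counter i+1 means current index i.
-- indices are always in range (i < length), so getD's default 0 is never consulted.
def loopA (a b : List Int) : Nat → Int
  | 0 => 0
  | i + 1 =>
    let ai := a.getD i 0
    let bi := b.getD i 0
    if ai ≠ bi then (if ai > bi then 1 else -1) else loopA a b i

def LongCompare (a : List Int) (b : List Int) : Int :=
  let a' := stripZeros a
  let b' := stripZeros b
  if a'.length = b'.length then loopA a' b' a'.length
  else if a'.length > b'.length then 1 else -1

-- ===== PORT B =====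
-- the body of B's single for-loop; state = (la, lb, res)
def stepB (a b : List Int) (st : Nat × Nat × Int) (i : Nat) : Nat × Nat × Int :=
  let da := a.getD i 0          -- a[i] if i < len(a) else 0
  let db := b.getD i 0
  let la := if da ≠ 0 then i + 1 else st.1
  let lb := if db ≠ 0 then i + 1 else st.2.1
  let res := if da ≠ db then (if da > db then (1 : Int) else -1) else st.2.2
  (la, lb, res)

def LongCompare_alt (a : List Int) (b : List Int) : Int :=
  let s := (List.range (max a.length b.length)).foldl (stepB a b)
    (min a.length 1, min b.length 1, 0)   -- la = 1 if a else 0, lb likewise, res = 0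
  if s.1 ≠ s.2.1 then (if s.1 > s.2.1 then 1 else -1) else s.2.2

-- ===== PRECONDITION & SPEC =====
def Spec_LongCompare (a : List Int) (b : List Int) (out : Int) : Prop := out = LongCompare_alt a b
instance (a : List Int) (b : List Int) (out : Int) : Decidable (Spec_LongCompare a b out) := by unfold Spec_LongCompare; infer_instance

-- ===== CLAIM (what is proved, stated in full; the proofs are below) =====
def Claim_equal_LongCompare : Prop := ∀ (a : List Int) (b : List Int), Dom_LongCompare a b → Spec_LongCompare a b (LongCompare a b)

-- ===== LEMMAS AND PROOFS =====

-- B's la component in isolation: effective length after scanning indices < n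
def effL (a : List Int) : Nat → Nat
  | 0 => min a.length 1
  | n + 1 => if a.getD n 0 ≠ 0 then n + 1 else effL a n

-- the foldl computes the three components independently
theorem foldB_eq (a b : List Int) (n : Nat) :
    (List.range n).foldl (stepB a b) (min a.length 1, min b.length 1, 0)
      = (effL a n, effL b n, loopA a b n) := by
  induction n with
  | zero => rfl
  | succ n ih =>
    rw [List.range_succ, List.foldl_append, ih]
    simp only [List.foldl_cons, List.foldl_nil, stepB, effL, loopA]

-- stripZeros is a prefix of its argument
theorem strip_prefix (a : List Int) : (stripZeros a).IsPrefix a := by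
  fun_induction stripZeros a with
  | case1 x h ih => exact ih.trans (List.dropLast_prefix x)
  | case2 x h => exact List.prefix_refl x

theorem strip_len_le (a : List Int) : (stripZeros a).length ≤ a.length :=
  (strip_prefix a).length_le

theorem strip_len_pos (a : List Int) (h : a ≠ []) : 1 ≤ (stripZeros a).length := by
  fun_induction stripZeros a with
  | case1 x hx ih =>
    apply ih
    intro hnil
    have h0 : x.dropLast.length = 0 := by rw [hnil]; rfl
    rw [List.length_dropLast] at h0
    omega
  | case2 x hx =>
    have : x.length ≠ 0 := fun h0 => h (List.length_eq_zero_iff.mp h0)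
    omega

-- the stop condition holds of the result
theorem strip_stop (a : List Int) :
    ¬ (1 < (stripZeros a).length ∧ (stripZeros a).getLast? = some 0) := by
  fun_induction stripZeros a with
  | case1 x hx ih => exact ih
  | case2 x hx => exact hx

-- all digits at or beyond the stripped length are zero
theorem strip_tail_zero (a : List Int) :
    ∀ i, (stripZeros a).length ≤ i → a.getD i 0 = 0 := by
  fun_induction stripZeros a with
  | case1 x hx ih =>
    intro i hi
    by_cases hlt : i < x.length - 1
    · have := ih i hi
      rwa [List.getD_eq_getElem?_getD, List.getElem?_dropLast,
        if_pos hlt, ← List.getD_eq_getElem?_getD] at this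
    · by_cases hge : x.length ≤ i
      · simp [List.getD_eq_getElem?_getD, List.getElem?_eq_none hge]
      · -- i = x.length - 1 : the popped last element, which is 0
        have hi' : i = x.length - 1 := by omega
        have hlen : 1 < x.length := hx.1
        have hlast : x.getLast? = some 0 := hx.2
        rw [List.getLast?_eq_getElem?] at hlast
        rw [hi', List.getD_eq_getElem?_getD, hlast]
        rfl
  | case2 x hx =>
    intro i hi
    simp [List.getD_eq_getElem?_getD, List.getElem?_eq_none hi]

-- agreement with the original on indices below the stripped length
theorem strip_getD (a : List Int) (i : Nat) (hi : i < (stripZeros a).length) :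
    (stripZeros a).getD i 0 = a.getD i 0 := by
  obtain ⟨t, ht⟩ := strip_prefix a
  rw [List.getD_eq_getElem?_getD, List.getD_eq_getElem?_getD]
  conv_rhs => rw [← ht]
  rw [List.getElem?_append_left hi]

-- effL ignores indices known to hold zeros
theorem effL_stable (a : List Int) (m : Nat)
    (hz : ∀ i, m ≤ i → a.getD i 0 = 0) :
    ∀ n, m ≤ n → effL a n = effL a m := by
  intro n
  induction n with
  | zero =>
    intro h
    have hm : m = 0 := Nat.le_zero.mp h
    subst hm
    rfl
  | succ k ih =>
    intro h
    rcases Nat.eq_or_lt_of_le h with h' | h'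
    · rw [h']
    · have hzk : a.getD k 0 = 0 := hz k (by omega)
      have hstep : effL a (k + 1) = effL a k := by
        simp only [effL]
        rw [hzk]
        simp
      rw [hstep]
      exact ih (by omega)

-- effL over the whole (padded) range computes exactly the stripped length
theorem effL_char (a : List Int) (n : Nat) (hn : a.length ≤ n) :
    effL a n = (stripZeros a).length := by
  set L := (stripZeros a).length with hL
  have hLle : L ≤ a.length := strip_len_le a
  have htail : ∀ i, L ≤ i → a.getD i 0 = 0 := strip_tail_zero a
  by_cases hnil : a = []
  · subst hnil
    have hL0 : L = 0 := by
      simp only [hL]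
      have := strip_len_le ([] : List Int)
      simpa using this
    rw [effL_stable ([] : List Int) 0 (fun i _ => by simp [List.getD]) n (by omega), hL0]
    rfl
  · have hL1 : 1 ≤ L := strip_len_pos a hnil
    have hstep : effL a n = effL a L := effL_stable a L htail n (by omega)
    rw [hstep]
    rcases Nat.lt_or_ge L 2 with hL2 | hL2
    · -- L = 1
      have : L = 1 := by omega
      rw [this]
      simp only [effL]
      have hmin : min a.length 1 = 1 := by omega
      split <;> omega
    · -- L ≥ 2 : last kept digit is nonzero
      have hstop := strip_stop a
      have hlast : (stripZeros a).getLast? ≠ some 0 := by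
        intro h; exact hstop ⟨by omega, h⟩
      have hne : stripZeros a ≠ [] := by
        intro h; rw [h] at hL; simp at hL; omega
      have hgl : (stripZeros a).getLast? = (stripZeros a)[L - 1]? := by
        rw [List.getLast?_eq_getElem?]
      have hidx : L - 1 < L := by omega
      have hsome : (stripZeros a)[L - 1]? = some ((stripZeros a).getD (L-1) 0) := by
        rw [List.getD_eq_getElem?_getD, List.getElem?_eq_getElem hidx]
        rfl
      have hnz : a.getD (L-1) 0 ≠ 0 := by
        intro h0
        apply hlast
        rw [hgl, hsome, strip_getD a (L-1) hidx, h0]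
      obtain ⟨k, hk⟩ : ∃ k, L = k + 1 := ⟨L - 1, by omega⟩
      have hk' : k = L - 1 := by omega
      rw [hk]
      simp only [effL]
      rw [if_pos (by rw [hk']; exact hnz)]

-- loopA ignores indices where the (padded) digits agree
theorem loopA_stable (a b : List Int) (m : Nat)
    (hz : ∀ i, m ≤ i → a.getD i 0 = b.getD i 0) :
    ∀ n, m ≤ n → loopA a b n = loopA a b m := by
  intro n
  induction n with
  | zero =>
    intro h
    have hm : m = 0 := Nat.le_zero.mp h
    subst hm
    rfl
  | succ k ih =>
    intro h
    rcases Nat.eq_or_lt_of_le h with h' | h'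
    · rw [h']
    · have heq : a.getD k 0 = b.getD k 0 := hz k (by omega)
      have hstep : loopA a b (k + 1) = loopA a b k := by
        simp only [loopA]
        rw [heq]
        simp
      rw [hstep]
      exact ih (by omega)

-- loopA only consults digits below its bound
theorem loopA_congr (a b a' b' : List Int) :
    ∀ m, (∀ i, i < m → a.getD i 0 = a'.getD i 0 ∧ b.getD i 0 = b'.getD i 0) →
      loopA a b m = loopA a' b' m := by
  intro m
  induction m with
  | zero => intro _; rfl
  | succ k ih =>
    intro h
    obtain ⟨ha, hb⟩ := h k (by omega)
    simp only [loopA, ha, hb]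
    rw [ih (fun i hi => h i (by omega))]

-- ===== VERDICT (by name: the statement is the Claim_ definition above) =====
theorem LongCompare_spec : Claim_equal_LongCompare := by
  intro a b _
  show LongCompare a b = LongCompare_alt a b
  unfold LongCompare LongCompare_alt
  rw [foldB_eq]
  rw [effL_char a (max a.length b.length) (by omega),
    effL_char b (max a.length b.length) (by omega)]
  by_cases hlen : (stripZeros a).length = (stripZeros b).length
  · rw [if_pos hlen, if_neg (by simpa using hlen)]
    have h1 : loopA a b (max a.length b.length) = loopA a b (stripZeros a).length :=
      loopA_stable a b (stripZeros a).length
        (fun i hi => by rw [strip_tail_zero a i hi, strip_tail_zero b i (by omega)])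
        (max a.length b.length) (by have := strip_len_le a; omega)
    rw [h1]
    exact loopA_congr (stripZeros a) (stripZeros b) a b (stripZeros a).length
      (fun i hi => ⟨strip_getD a i hi, strip_getD b i (hlen ▸ hi)⟩)
  · have hne : (stripZeros a).length ≠ (stripZeros b).length := hlen
    rw [if_neg hlen, if_pos hne]
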